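-- pv_equiv track=rewrite | github.com/jiyeonkim26/markdown-compiler | markdown_compiler/util/line_functions.py | compile_italic_underscore
-- ===== SOURCE A (Python) =====
-- def compile_italic_underscore(line):
--     '''
--     Convert "_italic_" into "<i>italic</i>".
--
--     HINT:
--     This function is almost exactly the same as `compile_italic_star`.
--
--     >>> compile_italic_underscore('_This is italic!_ This is not italic.')
--     '<i>This is italic!</i> This is not italic.'
--     >>> compile_italic_underscore('_This is italic!_')
--     '<i>This is italic!</i>'
--     >>> compile_italic_underscore('This is _italic_!')
--     'This is <i>italic</i>!'
--     >>> compile_italic_underscore('This is not _italic!')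
--     'This is not _italic!'
--     >>> compile_italic_underscore('_')
--     '_'
--     '''
--     if line.count('_') < 2:
--         return line
--
--     accumulator = ''
--     has_opened = False
--
--     for char in line:
--         if char == '_':
--             if not has_opened:
--                 accumulator += '<i>'
--                 has_opened = True
--             else:
--                 accumulator += '</i>'
--                 has_opened = False
--         else:
--             accumulator += char
--     return accumulator
-- ===== SOURCE B (Python) =====
-- def compile_italic_underscore(line):
--     if line.count('_') < 2:
--         return line
--     parts = line.split('_')
--     pieces = [parts[0]]
--     for i, part in enumerate(parts[1:]):
--         pieces.append('<i>' if i % 2 == 0 else '</i>')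
--         pieces.append(part)
--     return ''.join(pieces)
-- ===== Notes on version B (the rewrite author's own statement) =====
-- stated objective: idiomatic
-- what changed: Replaces the character-by-character loop with a toggling boolean flag by splitting the line at underscores and rebuilding it with alternating open/close italic tags inserted between the parts.
import Mathlib
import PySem

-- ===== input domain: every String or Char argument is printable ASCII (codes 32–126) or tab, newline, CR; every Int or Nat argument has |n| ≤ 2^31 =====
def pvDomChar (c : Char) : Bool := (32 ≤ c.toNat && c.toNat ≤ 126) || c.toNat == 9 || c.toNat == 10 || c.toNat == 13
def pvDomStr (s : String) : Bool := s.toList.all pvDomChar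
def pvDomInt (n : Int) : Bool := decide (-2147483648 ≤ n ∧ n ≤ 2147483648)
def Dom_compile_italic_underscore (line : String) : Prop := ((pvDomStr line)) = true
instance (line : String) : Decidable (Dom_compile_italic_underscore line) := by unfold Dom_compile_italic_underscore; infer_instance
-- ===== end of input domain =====

-- B rebuilds the line from line.split('_') with alternating <i>/</i> tags instead of A's
-- character-by-character loop with a toggle flag; same return value, different decomposition.

-- ===== PORT A =====
def compile_italic_underscore (line : String) : String :=
  if PySem.Str.count line "_" < 2 then line
  else
    -- accumulator : str (as List Char), has_opened : bool; one step per character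
    let r := line.toList.foldl
      (fun (st : List Char × Bool) c =>
        if c = '_' then
          if st.2 = false then (st.1 ++ ['<', 'i', '>'], true)
          else (st.1 ++ ['<', '/', 'i', '>'], false)
        else (st.1 ++ [c], st.2))
      ([], false)
    String.ofList r.1

-- ===== PORT B =====
def compile_italic_underscore_alt (line : String) : String :=
  if PySem.Str.count line "_" < 2 then line
  else
    let parts := PySem.Chars.splitOn line.toList "_".toList   -- line.split('_'), sep ≠ ''
    -- pieces = [parts[0]]; parts is never empty, so parts[0] is parts.headD []
    let pieces := (PySem.List.enumerate (parts.drop 1) 0).foldl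
      (fun (acc : List (List Char)) ip =>
        acc ++ [(if PySem.Int.mod ip.1 2 = 0 then ['<', 'i', '>'] else ['<', '/', 'i', '>']), ip.2])
      [parts.headD []]
    String.ofList pieces.flatten                                   -- ''.join(pieces)

-- ===== PRECONDITION & SPEC =====
def Spec_compile_italic_underscore (line : String) (out : String) : Prop := out = compile_italic_underscore_alt line
instance (line : String) (out : String) : Decidable (Spec_compile_italic_underscore line out) := by unfold Spec_compile_italic_underscore; infer_instance

-- ===== CLAIM (what is proved, stated in full; the proofs are below) =====
def Claim_equal_compile_italic_underscore : Prop := ∀ (line : String), Dom_compile_italic_underscore line → Spec_compile_italic_underscore line (compile_italic_underscore line)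

-- ===== LEMMAS AND PROOFS =====

-- the parts of cs split at '_' (structural form of PySem.Chars.splitOn cs ['_'])
def splitU : List Char → List (List Char)
  | [] => [[]]
  | c :: rest => if c = '_' then [] :: splitU rest else (splitU rest).modifyHead (c :: ·)

-- the parts joined back with alternating tags, tag parity given by n
def interJ (n : Int) : List (List Char) → List Char
  | [] => []
  | [p] => p
  | p :: q :: ps =>
      p ++ (if PySem.Int.mod n 2 = 0 then ['<', 'i', '>'] else ['<', '/', 'i', '>'])
        ++ interJ (n + 1) (q :: ps)

-- tagJoin n ps : tag n ++ p₀ ++ tag (n+1) ++ p₁ ++ … (what B's fold appends after parts[0])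
def tagJoin (n : Int) : List (List Char) → List Char
  | [] => []
  | p :: ps =>
      (if PySem.Int.mod n 2 = 0 then ['<', 'i', '>'] else ['<', '/', 'i', '>']) ++ p ++ tagJoin (n + 1) ps

theorem splitU_ne_nil (cs : List Char) : splitU cs ≠ [] := by
  cases cs with
  | nil => simp [splitU]
  | cons c rest =>
    simp only [splitU]
    split
    · simp
    · cases h : splitU rest with
      | nil => exact absurd h (splitU_ne_nil rest)
      | cons p ps => simp

theorem go_char (cs : List Char) : ∀ (fuel : Nat) (cur : List Char) (acc : List (List Char)),
    cs.length ≤ fuel →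
    PySem.Chars.splitOn.go ['_'] fuel cs cur acc
      = acc.reverse ++ (splitU cs).modifyHead (cur.reverse ++ ·) := by
  induction cs with
  | nil =>
    intro fuel cur acc h
    cases fuel <;> simp [PySem.Chars.splitOn.go, splitU]
  | cons c rest ih =>
    intro fuel cur acc h
    cases fuel with
    | zero => simp at h
    | succ f =>
      by_cases hc : c = '_'
      · subst hc
        rw [show PySem.Chars.splitOn.go ['_'] (f+1) ('_' :: rest) cur acc
              = PySem.Chars.splitOn.go ['_'] f rest [] (cur.reverse :: acc) from by
            simp [PySem.Chars.splitOn.go, List.isPrefixOf]]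
        rw [ih f [] _ (by simpa using h)]
        cases hs : splitU rest with
        | nil => exact absurd hs (splitU_ne_nil rest)
        | cons p ps => simp [splitU, hs]
      · rw [show PySem.Chars.splitOn.go ['_'] (f+1) (c :: rest) cur acc
              = PySem.Chars.splitOn.go ['_'] f rest (c :: cur) acc from by
            simp [PySem.Chars.splitOn.go, List.isPrefixOf, beq_iff_eq, Ne.symm hc]]
        rw [ih f _ _ (by simpa using h)]
        cases hs : splitU rest with
        | nil => exact absurd hs (splitU_ne_nil rest)
        | cons p ps => simp [splitU, hs, hc]

theorem splitOn_eq_splitU (cs : List Char) : PySem.Chars.splitOn cs ['_'] = splitU cs := by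
  rw [PySem.Chars.splitOn, go_char cs (cs.length + 1) [] [] (by omega)]
  cases hs : splitU cs with
  | nil => exact absurd hs (splitU_ne_nil cs)
  | cons p ps => simp

theorem interJ_cons_head (n : Int) (c : Char) (p : List Char) (ps : List (List Char)) :
    interJ n ((c :: p) :: ps) = c :: interJ n (p :: ps) := by
  cases ps <;> simp [interJ]

-- A's loop, started with flag = parity of n, produces acc ++ the alternating rebuild of splitU cs
theorem loopA_eq_interJ (cs : List Char) : ∀ (n : Int) (acc : List Char), 0 ≤ n →
    (cs.foldl
      (fun (st : List Char × Bool) c =>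
        if c = '_' then
          if st.2 = false then (st.1 ++ ['<', 'i', '>'], true)
          else (st.1 ++ ['<', '/', 'i', '>'], false)
        else (st.1 ++ [c], st.2))
      (acc, decide (PySem.Int.mod n 2 = 1))).1
      = acc ++ interJ n (splitU cs) := by
  induction cs with
  | nil => intro n acc _; simp [interJ, splitU]
  | cons c rest ih =>
    intro n acc hn
    have h2 : PySem.Int.mod n 2 = n % 2 := PySem.Int.mod_eq_emod_of_pos (by norm_num)
    have h2' : PySem.Int.mod (n + 1) 2 = (n + 1) % 2 :=
      PySem.Int.mod_eq_emod_of_pos (by norm_num)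
    by_cases hc : c = '_'
    · subst hc
      rcases Int.emod_two_eq n with h | h
      · have hflag : decide (PySem.Int.mod n 2 = 1) = false := by simp [h]
        have hflag' : decide (PySem.Int.mod (n + 1) 2 = 1) = true := by
          simp; omega
        rw [hflag]
        simp only [List.foldl_cons]
        norm_num
        rw [show (acc ++ ['<', 'i', '>'], true)
              = (acc ++ ['<', 'i', '>'], decide (PySem.Int.mod (n + 1) 2 = 1)) from by rw [hflag'],
            ih (n + 1) _ (by omega)]
        cases hs : splitU rest with
        | nil => exact absurd hs (splitU_ne_nil rest)
        | cons p ps => simp [splitU, hs, interJ, h]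
      · have hflag : decide (PySem.Int.mod n 2 = 1) = true := by simp [h]
        have hflag' : decide (PySem.Int.mod (n + 1) 2 = 1) = false := by
          simp; omega
        rw [hflag]
        simp only [List.foldl_cons]
        norm_num
        rw [show (acc ++ ['<', '/', 'i', '>'], false)
              = (acc ++ ['<', '/', 'i', '>'], decide (PySem.Int.mod (n + 1) 2 = 1)) from by rw [hflag'],
            ih (n + 1) _ (by omega)]
        cases hs : splitU rest with
        | nil => exact absurd hs (splitU_ne_nil rest)
        | cons p ps => simp [splitU, hs, interJ, h]
    · simp only [List.foldl_cons, if_neg hc]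
      rw [ih n _ hn]
      cases hs : splitU rest with
      | nil => exact absurd hs (splitU_ne_nil rest)
      | cons p ps => simp [splitU, hs, hc, interJ_cons_head]

-- B's fold over enumerate appends tagJoin n ps to the pieces
theorem foldB_eq_tagJoin (ps : List (List Char)) : ∀ (n : Int) (acc : List (List Char)),
    ((PySem.List.enumerate ps n).foldl
      (fun (acc : List (List Char)) ip =>
        acc ++ [(if PySem.Int.mod ip.1 2 = 0 then ['<', 'i', '>'] else ['<', '/', 'i', '>']), ip.2])
      acc).flatten
      = acc.flatten ++ tagJoin n ps := by
  induction ps with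
  | nil => intro n acc; simp [PySem.List.enumerate_nil, tagJoin]
  | cons p ps ih =>
    intro n acc
    rw [PySem.List.enumerate_cons]
    simp only [List.foldl_cons]
    rw [ih (n + 1)]
    simp [tagJoin]

theorem head_tagJoin_eq_interJ (ps : List (List Char)) : ∀ (n : Int) (p : List Char),
    p ++ tagJoin n ps = interJ n (p :: ps) := by
  induction ps with
  | nil => intro n p; simp [tagJoin, interJ]
  | cons q ps ih =>
    intro n p
    simp only [tagJoin, interJ]
    rw [← ih (n + 1) q]
    simp

-- ===== VERDICT (by name: the statement is the Claim_ definition above) =====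
theorem compile_italic_underscore_spec : Claim_equal_compile_italic_underscore := by
  intro line _
  unfold Spec_compile_italic_underscore compile_italic_underscore compile_italic_underscore_alt
  by_cases hg : PySem.Str.count line "_" < 2
  · rw [if_pos hg, if_pos hg]
  · simp only [if_neg hg]
    cases hs : splitU line.toList with
    | nil => exact absurd hs (splitU_ne_nil _)
    | cons p ps =>
      have hA := loopA_eq_interJ line.toList 0 [] (by omega)
      rw [show decide (PySem.Int.mod 0 2 = 1) = false from by decide, hs] at hA
      have hsplit : PySem.Chars.splitOn line.toList "_".toList = p :: ps := by
        simpa [hs] using splitOn_eq_splitU line.toList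
      simp only [hsplit, List.drop_succ_cons, List.drop_zero, List.headD_cons]
      rw [hA, foldB_eq_tagJoin ps 0 [p]]
      simp [head_tagJoin_eq_interJ]
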